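-- pv_equiv track=rewrite | github.com/mdakilmahmud/UIU-LAB-ASSIGNMENT | SET-B (2)/SET-B (2) solve.py | largestPerfectNumber
-- ===== SOURCE A (Python) =====
-- def isPerfectNumber(n):
--     if n < 2:
--         return False
--     divisors = 0
--     for i in range(1, n):
--         if n % i == 0:
--             divisors += i
--     return divisors == n
--
-- def largestPerfectNumber(nums):
--     numbers = []
--     for num in nums:
--         if isPerfectNumber(num):
--             numbers.append(num)
--     if numbers:
--         return max(numbers)
--     else:
--       return -1
-- ===== SOURCE B (Python) =====
-- def _isPerfect(n):
--     # divisor sum via sqrt pairing: 1 plus each divisor pair (i, n//i) for i*i <= n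
--     if n < 2:
--         return False
--     s = 1
--     i = 2
--     while i * i <= n:
--         if n % i == 0:
--             s += i
--             q = n // i
--             if q != i:
--                 s += q
--         i += 1
--     return s == n
--
-- def largestPerfectNumber(nums):
--     best = -1
--     for n in nums:
--         if n > best and _isPerfect(n):
--             best = n
--     return best
-- ===== Notes on version B (the rewrite author's own statement) =====
-- stated objective: faster
-- what changed: B replaces the O(n) trial loop over all i<n with divisor-pair summation up to sqrt(n), and replaces the collect-then-max pass with a single running-max pass that skips the perfect test for elements not exceeding the current best.
import Mathlib
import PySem

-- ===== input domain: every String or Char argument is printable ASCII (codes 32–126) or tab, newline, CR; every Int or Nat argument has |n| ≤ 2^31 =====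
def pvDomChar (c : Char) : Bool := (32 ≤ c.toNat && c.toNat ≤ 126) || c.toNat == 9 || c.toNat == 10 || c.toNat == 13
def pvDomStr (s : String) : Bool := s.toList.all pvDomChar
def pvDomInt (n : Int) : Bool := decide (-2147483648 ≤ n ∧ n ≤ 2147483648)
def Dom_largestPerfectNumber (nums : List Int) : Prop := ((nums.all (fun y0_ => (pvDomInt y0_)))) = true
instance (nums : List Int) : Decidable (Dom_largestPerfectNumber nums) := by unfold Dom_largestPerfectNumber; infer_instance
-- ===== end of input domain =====

-- B replaces A's O(n) trial loop by divisor-pair summation up to sqrt(n) and the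
-- collect-then-max pass by a single running-max pass (return value equivalence; objective: faster).

-- ===== PORT A =====
-- isPerfectNumber: sums i over range(1, n) with n % i == 0 and compares to n
def pvIsPerfectNumber (n : Int) : Bool :=
  if n < 2 then false
  else
    let divisors := (PySem.List.pyRange 1 n 1).foldl
      (fun acc i => if PySem.Int.mod n i = 0 then acc + i else acc) 0
    divisors == n

def largestPerfectNumber (nums : List Int) : Int :=
  let numbers := nums.foldl
    (fun acc num => if pvIsPerfectNumber num then acc ++ [num] else acc) ([] : List Int)
  match PySem.List.max? numbers (fun y => y) with
  | some m => m
  | none => -1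

-- ===== PORT B =====
-- Source B's while-loop 'while i*i <= n' of _isPerfect; it only runs with n ≥ 2, so the
-- (nonnegative) Python int state is carried as the Nat m = n.toNat
def pvPerfLoop (m i s : Nat) : Nat :=
  if h : i * i ≤ m then
    if m % i = 0 then
      pvPerfLoop m (i + 1) (if m / i ≠ i then s + i + m / i else s + i)
    else pvPerfLoop m (i + 1) s
  else s
termination_by m + 2 - i
decreasing_by
  all_goals
    rcases Nat.eq_zero_or_pos i with h0 | h0
    · omega
    · have := Nat.le_mul_of_pos_left i h0
      omega

def pvIsPerfectAlt (n : Int) : Bool :=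
  if n < 2 then false
  else pvPerfLoop n.toNat 2 1 == n.toNat

def largestPerfectNumber_alt (nums : List Int) : Int :=
  nums.foldl (fun best n => if best < n && pvIsPerfectAlt n then n else best) (-1)

-- ===== PRECONDITION & SPEC =====
def Spec_largestPerfectNumber (nums : List Int) (out : Int) : Prop := out = largestPerfectNumber_alt nums
instance (nums : List Int) (out : Int) : Decidable (Spec_largestPerfectNumber nums out) := by unfold Spec_largestPerfectNumber; infer_instance

-- ===== CLAIM (what is proved, stated in full; the proofs are below) =====
def Claim_equal_largestPerfectNumber : Prop := ∀ (nums : List Int), Dom_largestPerfectNumber nums → Spec_largestPerfectNumber nums (largestPerfectNumber nums)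

-- ===== LEMMAS AND PROOFS =====

-- f d = the contribution of the divisor pair (d, m / d)
def pvF (m d : Nat) : Nat := d + if m / d ≠ d then m / d else 0

-- what remains to be added from loop counter i on
def pvT (m i : Nat) : Nat :=
  ∑ d ∈ Finset.range (m + 1), if d ∣ m ∧ i ≤ d ∧ d * d ≤ m then pvF m d else 0

-- A's proper-divisor sum
def pvS (m : Nat) : Nat :=
  ∑ d ∈ Finset.range (m + 1), if d ∣ m ∧ d < m then d else 0

lemma pvT_stop (m i : Nat) (h : m < i * i) : pvT m i = 0 := by
  unfold pvT
  apply Finset.sum_eq_zero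
  intro d _
  rw [if_neg]
  rintro ⟨-, h1, h2⟩
  have := Nat.mul_le_mul h1 h1
  omega

lemma pvT_step (m i : Nat) (hi : i ≤ m) :
    pvT m i = (if i ∣ m ∧ i * i ≤ m then pvF m i else 0) + pvT m (i + 1) := by
  unfold pvT
  have key : ∀ d ∈ Finset.range (m + 1),
      (if d ∣ m ∧ i ≤ d ∧ d * d ≤ m then pvF m d else 0)
      = (if d = i then (if i ∣ m ∧ i * i ≤ m then pvF m i else 0) else 0)
        + (if d ∣ m ∧ i + 1 ≤ d ∧ d * d ≤ m then pvF m d else 0) := by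
    intro d _
    rcases eq_or_ne d i with rfl | hne
    · by_cases h1 : d ∣ m <;> by_cases h2 : d * d ≤ m <;> simp [h1, h2]
    · rw [if_neg hne, zero_add]
      apply if_congr _ rfl rfl
      constructor
      · rintro ⟨a, b, c⟩; exact ⟨a, by omega, c⟩
      · rintro ⟨a, b, c⟩; exact ⟨a, by omega, c⟩
  rw [Finset.sum_congr rfl key, Finset.sum_add_distrib,
    Finset.sum_ite_eq' (Finset.range (m + 1)) i
      (fun _ => if i ∣ m ∧ i * i ≤ m then pvF m i else 0),
    if_pos (Finset.mem_range.mpr (by omega))]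

lemma pvLoop_eq (m : Nat) (hm : 2 ≤ m) :
    ∀ fuel i s : Nat, m + 2 - i ≤ fuel → pvPerfLoop m i s = s + pvT m i := by
  intro fuel
  induction fuel with
  | zero =>
    intro i s hle
    have hgt : ¬ i * i ≤ m := by
      intro hc
      rcases Nat.eq_zero_or_pos i with h0 | h0
      · omega
      · have := Nat.le_mul_of_pos_left i h0
        omega
    rw [pvPerfLoop, dif_neg hgt, pvT_stop m i (by omega)]
    omega
  | succ fuel ih =>
    intro i s hle
    by_cases h : i * i ≤ m
    · have hile : i ≤ m := by
        rcases Nat.eq_zero_or_pos i with h0 | h0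
        · omega
        · have := Nat.le_mul_of_pos_left i h0
          omega
      by_cases hd : m % i = 0
      · have hi0 : i ≠ 0 := by
          rintro rfl
          rw [Nat.mod_zero] at hd
          omega
        have hdv : i ∣ m ∧ i * i ≤ m := ⟨Nat.dvd_of_mod_eq_zero hd, h⟩
        rw [pvPerfLoop, dif_pos h, if_pos hd, ih (i + 1) _ (by omega),
          pvT_step m i hile, if_pos hdv]
        unfold pvF
        split_ifs <;> omega
      · rw [pvPerfLoop, dif_pos h, if_neg hd, ih (i + 1) s (by omega),
          pvT_step m i hile, if_neg]
        · omega
        · rintro ⟨⟨c, rfl⟩, -⟩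
          exact hd (Nat.mul_mod_right i c)
    · rw [pvPerfLoop, dif_neg h, pvT_stop m i (by omega)]
      omega

-- the sqrt-pairing identity: proper-divisor sum = 1 + paired contributions of divisors ≤ sqrt m
lemma pvS_split (m : Nat) (hm : 2 ≤ m) : pvS m = 1 + pvT m 2 := by
  unfold pvS pvT
  have key : ∀ d ∈ Finset.range (m + 1),
      (if d ∣ m ∧ d < m then d else 0)
      = (if d = 1 then 1 else 0)
        + ((if d ∣ m ∧ 2 ≤ d ∧ d * d ≤ m then d else 0)
           + (if d ∣ m ∧ 2 ≤ d ∧ d < m ∧ m < d * d then d else 0)) := by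
    intro d _
    rcases eq_or_ne d 1 with rfl | hd1
    · simp [show (1 : Nat) < m by omega]
    · by_cases hdvd : d ∣ m
      · have hd0 : d ≠ 0 := by
          rintro rfl
          have := Nat.eq_zero_of_zero_dvd hdvd
          omega
        have h2 : 2 ≤ d := by omega
        have hdle : d ≤ m := Nat.le_of_dvd (by omega) hdvd
        by_cases hsq : d * d ≤ m
        · have hmul : 2 * d ≤ d * d := Nat.mul_le_mul_right d h2
          have hlt : d < m := by omega
          simp [hdvd, hsq, h2, hlt, hd1]
        · by_cases hlt : d < m <;> simp [hdvd, hsq, h2, hlt, hd1]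
      · simp [hdvd, hd1]
  rw [Finset.sum_congr rfl key, Finset.sum_add_distrib, Finset.sum_add_distrib,
    Finset.sum_ite_eq' (Finset.range (m + 1)) 1 (fun _ => 1),
    if_pos (Finset.mem_range.mpr (by omega))]
  congr 1
  have hF : ∀ d ∈ Finset.range (m + 1),
      (if d ∣ m ∧ 2 ≤ d ∧ d * d ≤ m then pvF m d else 0)
      = (if d ∣ m ∧ 2 ≤ d ∧ d * d ≤ m then d else 0)
        + (if (d ∣ m ∧ 2 ≤ d ∧ d * d ≤ m) ∧ m / d ≠ d then m / d else 0) := by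
    intro d _
    unfold pvF
    by_cases hc : d ∣ m ∧ 2 ≤ d ∧ d * d ≤ m
    · by_cases hq : m / d ≠ d <;> simp [hc, hq]
    · simp [hc]
  rw [Finset.sum_congr rfl hF, Finset.sum_add_distrib]
  congr 1
  -- bijection d ↦ m / d between the big proper divisors and the small non-root cofactors
  rw [← Finset.sum_filter, ← Finset.sum_filter]
  have hi : ∀ d ∈ (Finset.range (m + 1)).filter
      (fun d => d ∣ m ∧ 2 ≤ d ∧ d < m ∧ m < d * d),
      m / d ∈ (Finset.range (m + 1)).filter
      (fun d => (d ∣ m ∧ 2 ≤ d ∧ d * d ≤ m) ∧ m / d ≠ d) := by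
    intro d hd
    rw [Finset.mem_filter, Finset.mem_range] at hd
    obtain ⟨hdr, hdvd, h2, hlt, hsq⟩ := hd
    have hmd : d * (m / d) = m := Nat.mul_div_cancel' hdvd
    have he2 : 2 ≤ m / d := by
      have hq0 := hmd
      generalize hq : m / d = q at hq0 ⊢
      rcases Nat.lt_or_ge q 2 with hc | hc
      · have h01 : q = 0 ∨ q = 1 := by omega
        rcases h01 with rfl | rfl <;> omega
      · exact hc
    have helt : m / d < d := by
      by_contra hc
      rw [Nat.not_lt] at hc
      have := Nat.mul_le_mul_left d hc
      omega
    have hinv : m / (m / d) = d := Nat.div_div_self hdvd (by omega)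
    have hq : (m / d) * (m / d) ≤ m := by
      calc (m / d) * (m / d) ≤ (m / d) * d := Nat.mul_le_mul_left _ helt.le
        _ = d * (m / d) := Nat.mul_comm _ _
        _ = m := hmd
    have hmd' : (m / d) * d = m := by rw [Nat.mul_comm]; exact hmd
    rw [Finset.mem_filter, Finset.mem_range]
    exact ⟨by omega, ⟨⟨d, hmd'.symm⟩, he2, hq⟩, by omega⟩
  have hj : ∀ e ∈ (Finset.range (m + 1)).filter
      (fun d => (d ∣ m ∧ 2 ≤ d ∧ d * d ≤ m) ∧ m / d ≠ d),
      m / e ∈ (Finset.range (m + 1)).filter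
      (fun d => d ∣ m ∧ 2 ≤ d ∧ d < m ∧ m < d * d) := by
    intro e he
    rw [Finset.mem_filter, Finset.mem_range] at he
    obtain ⟨her, ⟨hdvd, h2, hsq⟩, hne⟩ := he
    have hmd : e * (m / e) = m := Nat.mul_div_cancel' hdvd
    have hle : e ≤ m / e := by
      have hmm : e * e ≤ e * (m / e) := by omega
      exact Nat.le_of_mul_le_mul_left hmm (by omega)
    have hlt : e < m / e := by omega
    have h1 : 2 * (m / e) ≤ e * (m / e) := Nat.mul_le_mul_right _ h2
    have h2' : m / e < m := by omega
    have h3 : m < (m / e) * (m / e) := by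
      calc m = e * (m / e) := hmd.symm
        _ < (m / e) * (m / e) := by
          apply Nat.mul_lt_mul_of_lt_of_le hlt (Nat.le_refl _)
          omega
    have hmd' : (m / e) * e = m := by rw [Nat.mul_comm]; exact hmd
    rw [Finset.mem_filter, Finset.mem_range]
    exact ⟨by omega, ⟨e, hmd'.symm⟩, by omega, h2', h3⟩
  refine Finset.sum_nbij' (fun d => m / d) (fun e => m / e) hi hj ?_ ?_ ?_
  · intro d hd
    rw [Finset.mem_filter, Finset.mem_range] at hd
    exact Nat.div_div_self hd.2.1 (by omega)
  · intro e he
    rw [Finset.mem_filter, Finset.mem_range] at he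
    exact Nat.div_div_self he.2.1.1 (by omega)
  · intro d hd
    rw [Finset.mem_filter, Finset.mem_range] at hd
    rw [Nat.div_div_self hd.2.1 (by omega)]

-- A's loop over range(1, m) sums exactly the proper divisors of m
lemma pvS_eq_range (m : Nat) (hm : 2 ≤ m) :
    (∑ k ∈ Finset.range (m - 1), if (1 + k) ∣ m then 1 + k else 0) = pvS m := by
  obtain ⟨m', rfl⟩ : ∃ m', m = m' + 1 := ⟨m - 1, by omega⟩
  unfold pvS
  simp only [Nat.add_sub_cancel]
  rw [Finset.sum_range_succ, if_neg (by rintro ⟨-, hc⟩; omega), add_zero,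
    Finset.sum_range_succ']
  simp only [ite_self, add_zero]
  apply Finset.sum_congr rfl
  intro k hk
  have hk' : k < m' := Finset.mem_range.mp hk
  apply if_congr _ _ rfl
  · constructor
    · intro h
      exact ⟨by rwa [Nat.add_comm 1 k] at h, by omega⟩
    · rintro ⟨h, -⟩
      rwa [Nat.add_comm k 1] at h
  · omega

lemma pvA_sum (m : Nat) (hm : 2 ≤ m) :
    (PySem.List.pyRange 1 (m : Int) 1).foldl
      (fun acc i => if PySem.Int.mod (m : Int) i = 0 then acc + i else acc) 0
    = (pvS m : Int) := by
  have h1 : (PySem.List.pyRange 1 (m : Int) 1).foldl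
      (fun acc i => if PySem.Int.mod (m : Int) i = 0 then acc + i else acc) 0
      = (PySem.List.pyRange 1 (m : Int) 1).foldl
      (fun acc i => acc + (if PySem.Int.mod (m : Int) i = 0 then i else 0)) 0 :=
    PySem.List.foldl_congr_mem _ _ _ _ (fun acc x _ => by split_ifs <;> ring)
  rw [h1, PySem.List.foldl_add, PySem.List.pyRange_one, List.map_map, zero_add]
  rw [← List.sum_toFinset _ (List.nodup_range), List.toFinset_range]
  have hN : ((m : Int) - 1).toNat = m - 1 := by omega
  rw [hN]
  trans ((∑ k ∈ Finset.range (m - 1), if (1 + k) ∣ m then 1 + k else 0 : Nat) : Int)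
  · rw [Nat.cast_sum]
    apply Finset.sum_congr rfl
    intro k _
    simp only [Function.comp_apply]
    simp only [PySem.Int.mod_eq_zero_iff_dvd]
    by_cases hd : (1 + k) ∣ m
    · rw [if_pos (by exact_mod_cast hd), if_pos hd]
      push_cast
      ring
    · rw [if_neg (fun hc => hd (by exact_mod_cast hc)), if_neg hd]
      simp
  · rw [pvS_eq_range m hm]

lemma perf_imp_ge (x : Int) (h : pvIsPerfectNumber x = true) : 2 ≤ x := by
  unfold pvIsPerfectNumber at h
  by_cases hx : x < 2
  · simp [hx] at h
  · omega

lemma perfect_eq (n : Int) : pvIsPerfectNumber n = pvIsPerfectAlt n := by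
  unfold pvIsPerfectNumber pvIsPerfectAlt
  by_cases h : n < 2
  · simp [h]
  · obtain ⟨m, rfl⟩ : ∃ m : Nat, n = (m : Int) := ⟨n.toNat, by omega⟩
    have hm : 2 ≤ m := by omega
    simp only [if_neg h, Int.toNat_natCast]
    rw [pvA_sum m hm, pvLoop_eq m hm (m + 2) 2 1 (by omega), pvS_split m hm]
    rw [Bool.eq_iff_iff]
    simp only [beq_iff_eq]
    omega

lemma fold_eq (nums : List Int) :
    largestPerfectNumber nums = largestPerfectNumber_alt nums := by
  unfold largestPerfectNumber largestPerfectNumber_alt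
  have hfun : ∀ (b x : Int),
      (if b < x && pvIsPerfectAlt x then x else b)
      = (if pvIsPerfectNumber x then max b x else b) := by
    intro b x
    rw [perfect_eq x]
    by_cases hp : pvIsPerfectAlt x <;> by_cases hlt : b < x <;>
      simp [hp, hlt, max_def] <;> omega
  simp only [hfun]
  rw [← List.foldl_filter, ← List.foldl_filter, PySem.List.foldl_append_singleton]
  simp only [List.nil_append]
  cases hl : nums.filter pvIsPerfectNumber with
  | nil => simp [PySem.List.max?]
  | cons x t =>
    rw [PySem.List.max?_id_cons]
    have hx : 2 ≤ x := by
      have : x ∈ nums.filter pvIsPerfectNumber := by rw [hl]; exact List.mem_cons_self ..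
      exact perf_imp_ge x (List.of_mem_filter this)
    simp only [List.foldl_cons]
    rw [max_eq_right (by omega : (-1:Int) ≤ x)]

-- ===== VERDICT (by name: the statement is the Claim_ definition above) =====
theorem largestPerfectNumber_spec : Claim_equal_largestPerfectNumber := by
  intro nums _
  unfold Spec_largestPerfectNumber
  exact fold_eq nums
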